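-- pv_equiv track=rewrite | github.com/dotcomaki/BSCS1002_Python | Week 6/PPA8.py | factors_upto
-- ===== SOURCE A (Python) =====
-- def factors_upto(n):
--     D = {}
--     for i in range(1, n + 1):
--         s = set()
--         for j in range(1, i + 1):
--             if i % j == 0:
--                 s.add(j)
--         D[i] = s
--     return D
-- ===== SOURCE B (Python) =====
-- def factors_upto(n):
--     D = {i: set() for i in range(1, n + 1)}
--     for j in range(1, n + 1):
--         for m in range(j, n + 1, j):
--             D[m].add(j)
--     return D
-- ===== Notes on version B (the rewrite author's own statement) =====
-- stated objective: faster
-- what changed: replaces per-number trial division (inner scan j=1..i for every i) by a sieve that walks the multiples of each j once, adding j to each multiple's divisor set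
import Mathlib
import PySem

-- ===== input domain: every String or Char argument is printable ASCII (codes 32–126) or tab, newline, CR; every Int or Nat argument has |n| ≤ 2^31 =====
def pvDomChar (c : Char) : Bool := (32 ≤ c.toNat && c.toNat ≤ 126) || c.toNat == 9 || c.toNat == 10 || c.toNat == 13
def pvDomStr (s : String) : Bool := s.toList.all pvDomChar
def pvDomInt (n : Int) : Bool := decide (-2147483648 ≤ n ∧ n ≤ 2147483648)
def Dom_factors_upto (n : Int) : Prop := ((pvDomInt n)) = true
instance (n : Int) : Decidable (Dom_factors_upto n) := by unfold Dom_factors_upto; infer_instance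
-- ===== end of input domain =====

-- B replaces A's per-number trial division by a sieve over multiples (measurably faster);
-- both return the dict {i: set of divisors of i} for i = 1..n.

-- ===== PORT A =====
-- for i in 1..n: s = {j in 1..i : i % j == 0}; D[i] = s
def factors_upto (n : Int) : List (Int × List Int) :=
  ((PySem.List.pyRange 1 (n+1) 1).foldl (fun D i =>
      D.insert i ((PySem.List.pyRange 1 (i+1) 1).foldl
        (fun s j => if PySem.Int.mod i j == 0 then PySem.Set.add s j else s)
        PySem.Set.empty))
    PySem.Dict.empty).items

-- ===== PORT B =====
-- D = {i: set() for i in 1..n}; for j in 1..n: for m in range(j, n+1, j): D[m].add(j)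
def factors_upto_alt (n : Int) : List (Int × List Int) :=
  (((PySem.List.pyRange 1 (n+1) 1).foldl (fun D j =>
      (PySem.List.pyRange j (n+1) j).foldl
        (fun D m => D.modify m [] (fun s => PySem.Set.add s j)) D)
    ((PySem.List.pyRange 1 (n+1) 1).foldl (fun D i => D.insert i PySem.Set.empty)
      (PySem.Dict.empty : PySem.Dict Int (List Int))))).items

-- ===== PRECONDITION & SPEC =====
def Spec_factors_upto (n : Int) (out : List (Int × List Int)) : Prop := out = factors_upto_alt n
instance (n : Int) (out : List (Int × List Int)) : Decidable (Spec_factors_upto n out) := by unfold Spec_factors_upto; infer_instance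

-- ===== CLAIM (what is proved, stated in full; the proofs are below) =====
def Claim_equal_factors_upto : Prop := ∀ (n : Int), Dom_factors_upto n → Spec_factors_upto n (factors_upto n)

-- ===== LEMMAS AND PROOFS =====

-- divisors of m among 1..K, in increasing order (the common normal form of both ports)
def pvDivs (m K : Int) : List Int :=
  (PySem.List.pyRange 1 (K+1) 1).filter (fun j => PySem.Int.mod m j == 0)

theorem pvDivs_stable {m K : Int} (h1 : 1 ≤ m) (hK : m ≤ K) : pvDivs m K = pvDivs m m := by
  unfold pvDivs
  have h2 : (PySem.List.pyRange (m+1) (K+1) 1).filter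
      (fun j => PySem.Int.mod m j == 0) = [] := by
    refine (List.filter_eq_nil_iff).2 (fun j hj => ?_)
    rw [PySem.List.mem_pyRange_one] at hj
    simp only [beq_iff_eq, PySem.Int.mod_eq_zero_iff_dvd]
    intro hdvd
    exact absurd (Int.le_of_dvd (by omega) hdvd) (by omega)
  rw [PySem.List.pyRange_one_append 1 (m+1) (K+1) (by omega) (by omega), List.filter_append,
    h2, List.append_nil]

theorem pvDivs_succ (m : Int) (K : Nat) :
    pvDivs m ((K : Int) + 1) =
      pvDivs m K ++ (if PySem.Int.mod m ((K : Int) + 1) == 0 then [(K : Int) + 1] else []) := by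
  unfold pvDivs
  rw [PySem.List.pyRange_one_succ_right (by omega : (1:Int) ≤ (K:Int)+1), List.filter_append]
  by_cases h : PySem.Int.mod m ((K : Int) + 1) == 0 <;>
    simp only [List.filter_cons, List.filter_nil, h, if_true, if_false,
      Bool.false_eq_true]

theorem pvDivs_mem_lt {m K x : Int} (hx : x ∈ pvDivs m K) : x < K + 1 := by
  unfold pvDivs at hx
  have := List.mem_of_mem_filter hx
  rw [PySem.List.mem_pyRange_one] at this
  omega

-- A's inner loop: set-adding each passing j of a duplicate-free list is filtering
theorem pvSetFold (m : Int) (l : List Int) (hnd : l.Nodup) :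
    l.foldl (fun s j => if PySem.Int.mod m j == 0 then PySem.Set.add s j else s)
      PySem.Set.empty = l.filter (fun j => PySem.Int.mod m j == 0) := by
  rw [PySem.List.foldl_if_eq_foldl_filter]
  have h : (l.filter (fun j => PySem.Int.mod m j == 0)).foldl PySem.Set.add PySem.Set.empty
      = PySem.Set.update PySem.Set.empty (l.filter (fun j => PySem.Int.mod m j == 0)) := rfl
  rw [h, PySem.Set.update_eq_append_of_disjoint _ _ (hnd.filter _) (by simp [PySem.Set.empty])]
  simp [PySem.Set.empty]

-- A's items are the increasing divisor lists
theorem pvA_items (n : Int) :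
    factors_upto n = (PySem.List.pyRange 1 (n+1) 1).map (fun i => (i, pvDivs i i)) := by
  unfold factors_upto
  rw [PySem.Dict.items_foldl_insert_fresh _ (fun i => i) _ _
      (fun a _ => PySem.Dict.contains_empty a)
      (by simpa using PySem.List.nodup_pyRange_one 1 (n+1))]
  simp only [PySem.Dict.empty, List.nil_append]
  refine List.map_congr_left (fun i hi => ?_)
  rw [pvSetFold i _ (PySem.List.nodup_pyRange_one 1 (i+1))]
  rfl

-- a step-j range is duplicate-free
theorem pvNodupRange (a b s : Int) (hs : 0 < s) : (PySem.List.pyRange a b s).Nodup := by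
  rw [PySem.List.pyRange_of_pos a b hs]
  refine List.Nodup.map ?_ List.nodup_range
  intro x y h
  have h2 : s * (x : Int) = s * (y : Int) := by linarith
  have := mul_left_cancel₀ (by omega : s ≠ 0) h2
  exact_mod_cast this

-- B's empty-sets initialisation, as an items list
theorem pvD0_items (n : Int) :
    ((PySem.List.pyRange 1 (n+1) 1).foldl
        (fun D i => D.insert i PySem.Set.empty) PySem.Dict.empty).items
      = (PySem.List.pyRange 1 (n+1) 1).map (fun i => (i, ([] : List Int))) := by
  rw [PySem.Dict.items_foldl_insert_fresh _ (fun i => i) _ _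
      (fun a _ => PySem.Dict.contains_empty a)
      (by simpa using PySem.List.nodup_pyRange_one 1 (n+1))]
  simp [PySem.Dict.empty, PySem.Set.empty]

-- a fold of modifies over a duplicate-free key list, read back at one key
theorem pvGetD_fold (g : List Int → List Int) (M : List Int) (hM : M.Nodup) :
    ∀ (d : PySem.Dict Int (List Int)) (m : Int),
      (M.foldl (fun d x => d.modify x [] g) d).getD m [] =
        if m ∈ M then g (d.getD m []) else d.getD m [] := by
  induction M with
  | nil => simp
  | cons x M ih =>
    intro d m
    rcases List.nodup_cons.1 hM with ⟨hx, hM'⟩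
    simp only [List.foldl_cons]
    rw [ih hM' (d.modify x [] (fun s => g s)) m]
    by_cases hmx : m = x
    · subst hmx
      simp [hx, PySem.Dict.getD_modify_self]
    · rw [PySem.Dict.getD_modify d x m [] g]
      simp [hmx, List.mem_cons]

-- keys are preserved by one sieve pass (every modified key lies in 1..n)
theorem pvKeys_step (n j : Int) (hj : 1 ≤ j) (d : PySem.Dict Int (List Int))
    (hk : d.keys = PySem.List.pyRange 1 (n+1) 1) :
    ((PySem.List.pyRange j (n+1) j).foldl
        (fun d m => d.modify m [] (fun s => PySem.Set.add s j)) d).keys =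
      PySem.List.pyRange 1 (n+1) 1 := by
  rw [PySem.Dict.keys_foldl_modify _ _ (fun _ _ => (fun s => PySem.Set.add s j)) d, hk,
    PySem.Set.update_eq_append_filter, (List.filter_eq_nil_iff).2, List.append_nil]
  intro x hx
  have hx' := (PySem.Set.mem_ofList _ _).1 hx
  rw [PySem.List.mem_pyRange_iff_of_pos (by omega)] at hx'
  simp only [Bool.not_eq_eq_eq_not, Bool.not_true, PySem.Set.contains_eq_listContains,
    List.contains_eq_mem, decide_eq_false_iff_not, not_not, PySem.List.mem_pyRange_one]
  omega

-- the sieve invariant: after passes j = 1..K, keys are 1..n and entry m holds the divisors ≤ K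
theorem pvB_inv (n : Int) (_hn : 0 ≤ n) : ∀ (K : Nat), (K : Int) ≤ n →
    (((PySem.List.pyRange 1 ((K : Int)+1) 1).foldl (fun D j =>
        (PySem.List.pyRange j (n+1) j).foldl
          (fun D m => D.modify m [] (fun s => PySem.Set.add s j)) D)
      ((PySem.List.pyRange 1 (n+1) 1).foldl (fun D i => D.insert i PySem.Set.empty)
        (PySem.Dict.empty : PySem.Dict Int (List Int))))).keys = PySem.List.pyRange 1 (n+1) 1 ∧
    ∀ m, 1 ≤ m → m ≤ n →
      (((PySem.List.pyRange 1 ((K : Int)+1) 1).foldl (fun D j =>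
          (PySem.List.pyRange j (n+1) j).foldl
            (fun D m => D.modify m [] (fun s => PySem.Set.add s j)) D)
        ((PySem.List.pyRange 1 (n+1) 1).foldl (fun D i => D.insert i PySem.Set.empty)
          (PySem.Dict.empty : PySem.Dict Int (List Int))))).getD m [] = pvDivs m K := by
  intro K
  induction K with
  | zero =>
    intro _
    have h0 : PySem.List.pyRange 1 (((0:Nat):Int) + 1) 1 = [] := by
      simp only [Nat.cast_zero, zero_add]
      exact PySem.List.pyRange_one_eq_nil (le_refl (1:Int))
    have hnd : ((PySem.List.pyRange 1 (n+1) 1).foldl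
        (fun D i => D.insert i PySem.Set.empty)
        (PySem.Dict.empty : PySem.Dict Int (List Int))).keys.Nodup := by
      show ((_ : PySem.Dict Int (List Int)).items.map (·.1)).Nodup
      rw [pvD0_items, List.map_map]
      show (List.map (fun i : Int => i) (PySem.List.pyRange 1 (n+1) 1)).Nodup
      simpa using PySem.List.nodup_pyRange_one 1 (n+1)
    constructor
    · rw [h0, List.foldl_nil]
      show (_ : PySem.Dict Int (List Int)).items.map (·.1) = _
      rw [pvD0_items, List.map_map]
      exact List.map_id _
    · intro m h1 h2
      rw [h0, List.foldl_nil]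
      have hmem : (m, ([] : List Int)) ∈ ((PySem.List.pyRange 1 (n+1) 1).foldl
          (fun D i => D.insert i PySem.Set.empty)
          (PySem.Dict.empty : PySem.Dict Int (List Int))).items := by
        rw [pvD0_items]
        exact List.mem_map.2 ⟨m, by rw [PySem.List.mem_pyRange_one]; omega, rfl⟩
      rw [PySem.Dict.getD_of_mem_items _ hmem hnd []]
      unfold pvDivs
      simp only [Nat.cast_zero, zero_add]
      rw [PySem.List.pyRange_one_eq_nil (le_refl (1:Int))]
      rfl
  | succ K ih =>
    intro hK
    have hcast : (((K+1 : Nat)) : Int) = (K : Int) + 1 := by push_cast; ring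
    obtain ⟨ihk, ihg⟩ := ih (by omega)
    rw [hcast, PySem.List.pyRange_one_succ_right (by omega : (1:Int) ≤ (K:Int)+1),
      List.foldl_append, List.foldl_cons, List.foldl_nil]
    set j : Int := (K : Int) + 1 with hj
    constructor
    · exact pvKeys_step n j (by omega) _ ihk
    · intro m h1 h2
      rw [pvGetD_fold _ _ (pvNodupRange j (n+1) j (by omega)) _ m, pvDivs_succ m K]
      have hmem : m ∈ PySem.List.pyRange j (n+1) j ↔ j ∣ m := by
        rw [PySem.List.mem_pyRange_iff_of_pos (by omega)]
        constructor
        · rintro ⟨_, _, hdd⟩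
          have h3 : j ∣ (m - j) + j := dvd_add hdd dvd_rfl
          simpa using h3
        · intro hd
          exact ⟨Int.le_of_dvd (by omega) hd, by omega, dvd_sub hd dvd_rfl⟩
      by_cases hd : j ∣ m
      · rw [if_pos (hmem.2 hd), ihg m h1 h2,
          PySem.Set.add_of_not_mem (fun hmm => absurd (pvDivs_mem_lt hmm) (by omega)),
          if_pos (by simpa [PySem.Int.mod_eq_zero_iff_dvd] using hd)]
      · rw [if_neg (fun hm => hd (hmem.1 hm)), ihg m h1 h2,
          if_neg (by simpa [PySem.Int.mod_eq_zero_iff_dvd] using hd), List.append_nil]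

-- ===== VERDICT (by name: the statement is the Claim_ definition above) =====
theorem factors_upto_spec : Claim_equal_factors_upto := by
  intro n _
  unfold Spec_factors_upto
  by_cases hn : n ≤ 0
  · have h0 : PySem.List.pyRange 1 (n+1) 1 = [] :=
      PySem.List.pyRange_one_eq_nil (by omega)
    unfold factors_upto factors_upto_alt
    rw [h0]
    rfl
  · have hcast : ((n.toNat : Nat) : Int) = n := Int.toNat_of_nonneg (by omega)
    obtain ⟨hk, hg⟩ := pvB_inv n (by omega) n.toNat (by omega)
    rw [hcast] at hk hg
    have hnd : (((PySem.List.pyRange 1 (n+1) 1).foldl (fun D j =>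
        (PySem.List.pyRange j (n+1) j).foldl
          (fun D m => D.modify m [] (fun s => PySem.Set.add s j)) D)
      ((PySem.List.pyRange 1 (n+1) 1).foldl (fun D i => D.insert i PySem.Set.empty)
        (PySem.Dict.empty : PySem.Dict Int (List Int))))).keys.Nodup := by
      rw [hk]; exact PySem.List.nodup_pyRange_one 1 (n+1)
    show factors_upto n = (_ : PySem.Dict Int (List Int)).items
    rw [PySem.Dict.items_eq_map_keys _ hnd [], hk, pvA_items]
    refine List.map_congr_left (fun m hm => ?_)
    rw [PySem.List.mem_pyRange_one] at hm
    rw [hg m hm.1 (by omega)]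
    exact (congrArg (fun l => (m, l)) (pvDivs_stable hm.1 (by omega : m ≤ n))).symm
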